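-- pv_equiv track=rewrite | github.com/kpiteira/ktrdr | ktrdr/api/services/ib_service.py | _check_sequential_preference
-- ===== SOURCE A (Python) =====
-- from typing import Optional, Dict, Any, List
--
-- def _check_sequential_preference(client_ids: List[int]) -> bool:
--     """Check if client IDs show sequential preference (1, 2, 3...)."""
--     if not client_ids:
--         return False
--
--     # Check if we're using consecutive IDs starting from a low number
--     client_ids_sorted = sorted(client_ids)
--     if len(client_ids_sorted) < 2:
--         return client_ids_sorted[0] <= 10  # Single connection using low ID
--
--     # Check for consecutive sequences
--     for i in range(len(client_ids_sorted) - 1):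
--         if client_ids_sorted[i + 1] - client_ids_sorted[i] != 1:
--             return False
--
--     return client_ids_sorted[0] <= 10  # Sequential and starting from low number
-- ===== SOURCE B (Python) =====
-- def _check_sequential_preference(client_ids):
--     """Check if client IDs show sequential preference (1, 2, 3...)."""
--     if not client_ids:
--         return False
--     lo = min(client_ids)
--     hi = max(client_ids)
--     # consecutive run of distinct ids iff span == count-1 and no duplicates
--     return hi - lo == len(client_ids) - 1 and len(set(client_ids)) == len(client_ids) and lo <= 10
-- ===== Notes on version B (the rewrite author's own statement) =====
-- stated objective: faster
-- what changed: Replaces sort + adjacent-difference scan with an O(n) min/max computation plus a duplicate check via set size: a consecutive run of distinct ids is exactly max-min == len-1 with no duplicates.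
import Mathlib
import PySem

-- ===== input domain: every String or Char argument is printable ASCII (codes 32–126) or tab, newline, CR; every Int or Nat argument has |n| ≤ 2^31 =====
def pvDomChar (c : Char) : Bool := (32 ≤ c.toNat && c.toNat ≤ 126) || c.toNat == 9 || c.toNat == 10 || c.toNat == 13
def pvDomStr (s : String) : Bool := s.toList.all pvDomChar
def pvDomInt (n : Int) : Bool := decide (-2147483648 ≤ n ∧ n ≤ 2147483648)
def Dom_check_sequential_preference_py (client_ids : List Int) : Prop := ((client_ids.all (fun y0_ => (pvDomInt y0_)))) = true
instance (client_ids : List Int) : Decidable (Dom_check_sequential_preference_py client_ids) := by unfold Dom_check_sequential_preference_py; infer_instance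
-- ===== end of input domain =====

-- B replaces A's sort + adjacent-difference scan by an O(n) min/max + duplicate (set-size) check.

-- ===== PORT A =====
-- the 'for i in range(len(s)-1)' loop with its early 'return False'; 'none' = the loop fell through
def pvLoopA (s : List Int) : List Int → Option Bool
  | [] => none
  | i :: rest =>
    if PySem.List.pyGetD s (i + 1) 0 - PySem.List.pyGetD s i 0 ≠ 1 then some false
    else pvLoopA s rest

def check_sequential_preference_py (client_ids : List Int) : Bool :=
  if client_ids = [] then false
  else
    let s := PySem.List.sorted client_ids (fun x => x)
    if s.length < 2 then decide (PySem.List.pyGetD s 0 0 ≤ 10)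
    else
      match pvLoopA s (PySem.List.pyRange 0 ((s.length : Int) - 1)) with
      | some b => b
      | none => decide (PySem.List.pyGetD s 0 0 ≤ 10)

-- ===== PORT B =====
def check_sequential_preference_py_alt (client_ids : List Int) : Bool :=
  match client_ids with
  | [] => false
  | x :: t =>
    let lo := List.foldl min x t          -- min(client_ids)
    let hi := List.foldl max x t          -- max(client_ids)
    decide (hi - lo = ((x :: t).length : Int) - 1) &&
    decide ((PySem.Set.ofList (x :: t)).length = (x :: t).length) &&
    decide (lo ≤ 10)

-- ===== PRECONDITION & SPEC =====
def Spec_check_sequential_preference_py (client_ids : List Int) (out : Bool) : Prop := out = check_sequential_preference_py_alt client_ids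
instance (client_ids : List Int) (out : Bool) : Decidable (Spec_check_sequential_preference_py client_ids out) := by unfold Spec_check_sequential_preference_py; infer_instance

-- ===== CLAIM (what is proved, stated in full; the proofs are below) =====
def Claim_equal_check_sequential_preference_py : Prop := ∀ (client_ids : List Int), Dom_check_sequential_preference_py client_ids → Spec_check_sequential_preference_py client_ids (check_sequential_preference_py client_ids)

-- ===== LEMMAS AND PROOFS =====

-- set(l) has as many elements as l exactly when l has no duplicates
theorem pv_ofList_length_iff (l : List Int) :
    (PySem.Set.ofList l).length = l.length ↔ l.Nodup := by
  constructor
  · intro h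
    induction l with
    | nil => simp
    | cons x t ih =>
      rw [PySem.Set.ofList_cons] at h
      by_cases hx : x ∈ t
      · exfalso
        have hx' : x ∈ PySem.Set.ofList t := (PySem.Set.mem_ofList t x).2 hx
        have hlt : ((PySem.Set.ofList t).discard x).length < (PySem.Set.ofList t).length := by
          simp only [PySem.Set.discard]
          have h1 := (PySem.Set.ofList t).length_filter_le (fun y => !(y == x))
          have h2 : ((PySem.Set.ofList t).filter (fun y => !(y == x))).length ≠ (PySem.Set.ofList t).length := by
            intro he
            have heq := ((PySem.Set.ofList t).filter_sublist (p := fun y => !(y == x))).eq_of_length he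
            have := (List.filter_eq_self.1 heq) x hx'
            simp at this
          omega
        have hle := PySem.Set.length_ofList_le t
        simp only [List.length_cons] at h
        omega
      · have hfix : (PySem.Set.ofList t).discard x = PySem.Set.ofList t := by
          simp only [PySem.Set.discard]
          refine List.filter_eq_self.2 ?_
          intro y hy
          have hyt : y ∈ t := (PySem.Set.mem_ofList t y).1 hy
          simp only [Bool.not_eq_eq_eq_not, Bool.not_true, beq_eq_false_iff_ne, ne_eq]
          rintro rfl; exact hx hyt
        rw [hfix] at h
        simp only [List.length_cons] at h
        exact List.nodup_cons.2 ⟨hx, ih (by omega)⟩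
  · intro h
    rw [PySem.Set.ofList_eq_self_of_nodup l h]

-- in a ≤-sorted nonempty list, every element is ≤ the last one
theorem pv_le_getLast (u : List Int) (c : Int) (h : (c :: u).Pairwise (· ≤ ·)) :
    ∀ x ∈ c :: u, x ≤ (c :: u).getLast (List.cons_ne_nil c u) := by
  induction u generalizing c with
  | nil => simp
  | cons b u' ih =>
    intro x hx
    have h' := List.pairwise_cons.1 h
    have hb := ih b h'.2
    rw [List.getLast_cons (List.cons_ne_nil b u')]
    rcases List.mem_cons.1 hx with rfl | hx'
    · exact le_trans (h'.1 b (by simp)) (hb b (by simp))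
    · exact hb x hx'

-- in a strictly sorted nonempty list, last - first ≥ length - 1
theorem pv_span_ge (u : List Int) (c : Int) (h : (c :: u).Pairwise (· < ·)) :
    (u.length : Int) ≤ (c :: u).getLast (List.cons_ne_nil c u) - c := by
  induction u generalizing c with
  | nil => simp
  | cons b u' ih =>
    have h' := List.pairwise_cons.1 h
    have hcb : c < b := h'.1 b (by simp)
    have := ih b h'.2
    rw [List.getLast_cons (List.cons_ne_nil b u')]
    simp only [List.length_cons]
    push_cast
    omega

-- consecutive-difference chain on a ≤-sorted nonempty list ↔ span = length-1 and no duplicates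
theorem pv_chain_iff (u : List Int) (c : Int) (h : (c :: u).Pairwise (· ≤ ·)) :
    (c :: u).IsChain (fun p q => q - p = 1) ↔
      ((c :: u).getLast (List.cons_ne_nil c u) - c = ((c :: u).length : Int) - 1 ∧ (c :: u).Nodup) := by
  induction u generalizing c with
  | nil => simp
  | cons b u' ih =>
    have h' := List.pairwise_cons.1 h
    have ihb := ih b h'.2
    rw [List.isChain_cons_cons, ihb, List.getLast_cons (List.cons_ne_nil b u')]
    constructor
    · rintro ⟨hcb, hspan, hnd⟩
      have hlt : ∀ y ∈ b :: u', c < y := by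
        intro y hy
        have hby : b ≤ y := by
          rcases List.mem_cons.1 hy with rfl | hy'
          · exact le_refl y
          · exact (List.pairwise_cons.1 h'.2).1 y hy'
        omega
      refine ⟨?_, ?_⟩
      · simp only [List.length_cons] at hspan ⊢
        push_cast at hspan ⊢
        omega
      · exact List.nodup_cons.2 ⟨fun hc => absurd rfl (ne_of_lt (hlt c hc)), hnd⟩
    · rintro ⟨hspan, hnd⟩
      have hnd' := List.nodup_cons.1 hnd
      have hpwlt : (b :: u').Pairwise (· < ·) :=
        ((h'.2).and hnd'.2).imp (fun ⟨hle, hne⟩ => lt_of_le_of_ne hle hne)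
      have hge := pv_span_ge u' b hpwlt
      have hcb : c < b :=
        lt_of_le_of_ne (h'.1 b (by simp)) (fun he => hnd'.1 (he ▸ List.mem_cons_self))
      simp only [List.length_cons] at hspan ⊢
      push_cast at hspan ⊢
      refine ⟨by omega, by omega, hnd'.2⟩

-- the loop falls through iff every visited difference is 1
theorem pv_loopA_none_iff (s : List Int) (idxs : List Int) :
    pvLoopA s idxs = none ↔ ∀ i ∈ idxs, PySem.List.pyGetD s (i + 1) 0 - PySem.List.pyGetD s i 0 = 1 := by
  induction idxs with
  | nil => simp [pvLoopA]
  | cons i rest ih =>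
    simp only [pvLoopA]
    split_ifs with hd
    · simp only [List.mem_cons]
      constructor
      · intro h; cases h
      · intro h; exact absurd (h i (Or.inl rfl)) hd
    · simp only [ne_eq, not_not] at hd
      simp only [List.mem_cons, ih]
      constructor
      · rintro h j (rfl | hj)
        · exact hd
        · exact h j hj
      · intro h j hj; exact h j (Or.inr hj)

-- the loop returns nothing or False
theorem pv_loopA_cases (s : List Int) (idxs : List Int) :
    pvLoopA s idxs = none ∨ pvLoopA s idxs = some false := by
  induction idxs with
  | nil => exact Or.inl rfl
  | cons i rest ih =>
    simp only [pvLoopA]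
    split_ifs with hd
    · exact Or.inr rfl
    · exact ih

-- the range loop over the list is the consecutive-difference chain condition
theorem pv_loop_iff_chain (s : List Int) :
    pvLoopA s (PySem.List.pyRange 0 ((s.length : Int) - 1)) = none ↔
      s.IsChain (fun p q => q - p = 1) := by
  rw [pv_loopA_none_iff, List.isChain_iff_getElem]
  constructor
  · intro h i hi
    have hmem : (i : Int) ∈ PySem.List.pyRange 0 ((s.length : Int) - 1) :=
      PySem.List.mem_pyRange_one.2 (by omega)
    have := h i hmem
    rw [PySem.List.pyGetD_eq_getElem s 0 (by omega) (by omega),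
        PySem.List.pyGetD_eq_getElem s 0 (by omega) (by omega)] at this
    have h1 : ((i : Int) + 1).toNat = i + 1 := by omega
    have h2 : ((i : Int)).toNat = i := by omega
    simp only [h1, h2] at this
    omega
  · intro h i hmem
    obtain ⟨h0, h1⟩ := PySem.List.mem_pyRange_one.1 hmem
    have hi : i.toNat + 1 < s.length := by omega
    have := h i.toNat hi
    rw [PySem.List.pyGetD_eq_getElem s 0 (by omega) (by omega),
        PySem.List.pyGetD_eq_getElem s 0 (by omega) (by omega)]
    have e1 : (i + 1).toNat = i.toNat + 1 := by omega
    simp only [e1]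
    omega

-- min(l) is the head of sorted(l)
theorem pv_min_eq_head (x : Int) (t : List Int) (m : Int) (s' : List Int)
    (hs : PySem.List.sorted (x :: t) (fun y => y) = m :: s') :
    List.foldl min x t = m := by
  have hmin := PySem.List.foldl_min_le t x
  have hmem : List.foldl min x t ∈ x :: t := by
    rcases PySem.List.foldl_min_mem t x with h | h
    · rw [h]; simp
    · exact List.mem_cons_of_mem x h
  have hm_le := PySem.List.key_head_sorted_le (x :: t) (fun y => y) hs
  have hm_mem : m ∈ x :: t := by
    have : m ∈ PySem.List.sorted (x :: t) (fun y => y) := by rw [hs]; simp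
    exact (PySem.List.sorted_perm (x :: t) (fun y => y) false).mem_iff.1 this
  refine le_antisymm ?_ (hm_le _ hmem)
  rcases List.mem_cons.1 hm_mem with rfl | h
  · exact hmin.1
  · exact hmin.2 m h

-- max(l) is the last element of sorted(l)
theorem pv_max_eq_getLast (x : Int) (t : List Int) (m : Int) (s' : List Int)
    (hs : PySem.List.sorted (x :: t) (fun y => y) = m :: s') :
    List.foldl max x t = (m :: s').getLast (List.cons_ne_nil m s') := by
  have hpw : (m :: s').Pairwise (· ≤ ·) := by
    have := PySem.List.sorted_pairwise (x :: t) (fun y => y)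
    rw [hs] at this; exact this
  have hle := pv_le_getLast s' m hpw
  have hmax := PySem.List.le_foldl_max t x
  have hmem : List.foldl max x t ∈ x :: t := by
    rcases PySem.List.foldl_max_mem t x with h | h
    · rw [h]; simp
    · exact List.mem_cons_of_mem x h
  have hperm := (PySem.List.sorted_perm (x :: t) (fun y => y) false)
  rw [hs] at hperm
  have hglmem : (m :: s').getLast (List.cons_ne_nil m s') ∈ x :: t :=
    hperm.mem_iff.1 (List.getLast_mem _)
  refine le_antisymm ?_ ?_
  · exact hle _ (hperm.mem_iff.2 hmem)
  · rcases List.mem_cons.1 hglmem with hgl | hgl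
    · rw [hgl]; exact hmax.1
    · exact hmax.2 _ hgl

-- ===== VERDICT (by name: the statement is the Claim_ definition above) =====
theorem check_sequential_preference_py_spec : Claim_equal_check_sequential_preference_py := by
  intro l _
  unfold Spec_check_sequential_preference_py
  match l with
  | [] => rfl
  | x :: t =>
    obtain ⟨m, s', hs⟩ : ∃ m s', PySem.List.sorted (x :: t) (fun y => y) = m :: s' := by
      rcases he : PySem.List.sorted (x :: t) (fun y => y) with _ | ⟨m, s'⟩
      · exact absurd ((PySem.List.sorted_eq_nil_iff (x :: t) (fun y => y) false).1 he)
          (List.cons_ne_nil x t)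
      · exact ⟨m, s', rfl⟩
    have hlen : (m :: s').length = (x :: t).length := by
      rw [← hs]; exact PySem.List.length_sorted (x :: t) (fun y => y) false
    have hpw : (m :: s').Pairwise (· ≤ ·) := by
      have := PySem.List.sorted_pairwise (x :: t) (fun y => y)
      rw [hs] at this; exact this
    have hperm : (m :: s').Perm (x :: t) := by
      have := PySem.List.sorted_perm (x :: t) (fun y => y) false
      rw [hs] at this; exact this
    have hmin := pv_min_eq_head x t m s' hs
    have hmax := pv_max_eq_getLast x t m s' hs
    match t with
    | [] =>
      have hsx : PySem.List.sorted [x] (fun y => y) = [x] :=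
        PySem.List.sorted_eq_self_of_pairwise [x] (fun y => y) (by simp)
      simp [check_sequential_preference_py, check_sequential_preference_py_alt, hsx,
        PySem.List.pyGetD_of_nonneg, PySem.Set.ofList_cons, PySem.Set.ofList_nil,
        PySem.Set.discard]
    | y :: t2 =>
      have hlen2 : (m :: s').length = t2.length + 2 := by simp at hlen ⊢; omega
      have hchain := pv_chain_iff s' m hpw
      have hloop := pv_loop_iff_chain (m :: s')
      have hnodup : (m :: s').Nodup ↔
          (PySem.Set.ofList (x :: y :: t2)).length = (x :: y :: t2).length := by
        rw [hperm.nodup_iff, ← pv_ofList_length_iff]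
      show check_sequential_preference_py (x :: y :: t2) = _
      rw [check_sequential_preference_py, if_neg (List.cons_ne_nil x (y :: t2))]
      simp only [hs]
      rw [check_sequential_preference_py_alt]
      simp only [hmin, hmax]
      by_cases hc : (m :: s').IsChain (fun p q => q - p = 1)
      · have hn : pvLoopA (m :: s') (PySem.List.pyRange 0 (((m :: s').length : Int) - 1)) = none :=
          hloop.2 hc
        rw [hn]
        obtain ⟨hspan, hnd⟩ := hchain.1 hc
        have hp1 : (m :: s').getLast (List.cons_ne_nil m s') - m = ((x :: y :: t2).length : Int) - 1 := by
          rw [← hlen]; exact hspan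
        have hp2 := hnodup.1 hnd
        simp only [hp1, hp2, decide_true, Bool.true_and]
        simp [PySem.List.pyGetD_of_nonneg]
      · have hsf : pvLoopA (m :: s') (PySem.List.pyRange 0 (((m :: s').length : Int) - 1)) = some false := by
          rcases pv_loopA_cases (m :: s') (PySem.List.pyRange 0 (((m :: s').length : Int) - 1)) with h | h
          · exact absurd (hloop.1 h) hc
          · exact h
        rw [hsf]
        have hne : ¬ ((m :: s').getLast (List.cons_ne_nil m s') - m = ((x :: y :: t2).length : Int) - 1
            ∧ (PySem.Set.ofList (x :: y :: t2)).length = (x :: y :: t2).length) := by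
          rintro ⟨hp1, hp2⟩
          exact hc (hchain.2 ⟨by rw [hlen]; exact hp1, hnodup.2 hp2⟩)
        have hs' : s' ≠ [] := by
          intro he; rw [he] at hlen2; simp at hlen2
        have hcast : (((x :: y :: t2).length : Int)) - 1 = (t2.length : Int) + 1 := by
          simp only [List.length_cons]; push_cast; ring
        rw [hcast] at hne
        by_cases hp1 : (m :: s').getLast (List.cons_ne_nil m s') - m = (t2.length : Int) + 1
        · have hp2 : ¬ (PySem.Set.ofList (x :: y :: t2)).length = (x :: y :: t2).length :=
            fun hp2 => hne ⟨hp1, hp2⟩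
          simp only [List.length_cons] at hp2
          simp [hs', hp2]
        · rw [List.getLast_cons hs'] at hp1
          simp [hs', hp1]
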